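-- pv_equiv track=rewrite | github.com/GEANT/bubo | core/report/statistics.py | analyze_web_security_stats
-- ===== SOURCE A (Python) =====
-- def analyze_web_security_stats(web_state: dict) -> dict[str, int]:
--     """
--     Analyze web security compliance based on ratings.
--
--     Args:
--         web_state: Web security validation state by domain
--
--     Returns:
--         Dictionary with web security compliance statistics
--     """
--     web_compliant = 0
--     web_partially_compliant = 0
--     web_non_compliant = 0
--
--     for domain, state in web_state.items():
--         rating = state["rating"]
--         if rating in ["excellent", "good"]:
--             web_compliant += 1
--         elif rating == "fair":
--             web_partially_compliant += 1
--         else: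
--             web_non_compliant += 1
--
--     return {
--         "compliant": web_compliant,
--         "partially_compliant": web_partially_compliant,
--         "non_compliant": web_non_compliant,
--     }
-- ===== SOURCE B (Python) =====
-- _CATEGORY = {
--     "excellent": "compliant",
--     "good": "compliant",
--     "fair": "partially_compliant",
-- }
--
-- def analyze_web_security_stats(web_state: dict) -> dict[str, int]:
--     buckets = [_CATEGORY.get(state["rating"], "non_compliant")
--                for state in web_state.values()]
--     return {key: buckets.count(key)
--             for key in ("compliant", "partially_compliant", "non_compliant")}
-- ===== Notes on version B (the rewrite author's own statement) =====
-- stated objective: alternative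
-- what changed: Replaces the branching three-accumulator loop by table-driven classification (a rating-to-category lookup dict) into a bucket list, with each result computed by a separate count pass over that list.
import Mathlib
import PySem

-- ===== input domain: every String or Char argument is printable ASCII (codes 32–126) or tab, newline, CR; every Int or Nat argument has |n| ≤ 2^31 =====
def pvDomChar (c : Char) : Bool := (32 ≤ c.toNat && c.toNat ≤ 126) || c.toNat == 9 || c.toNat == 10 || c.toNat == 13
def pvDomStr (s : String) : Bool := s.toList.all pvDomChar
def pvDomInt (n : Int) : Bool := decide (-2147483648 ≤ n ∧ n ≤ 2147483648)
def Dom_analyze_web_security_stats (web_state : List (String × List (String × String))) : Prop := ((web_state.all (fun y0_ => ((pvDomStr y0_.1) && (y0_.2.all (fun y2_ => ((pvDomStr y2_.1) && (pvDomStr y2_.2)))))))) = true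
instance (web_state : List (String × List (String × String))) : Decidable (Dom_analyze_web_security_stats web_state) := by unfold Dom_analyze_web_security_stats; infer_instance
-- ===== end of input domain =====

-- B replaces A's branching three-accumulator loop by a rating->category lookup table
-- producing a bucket list, with each result read off by a separate count pass.


-- ===== PORT A =====
-- state["rating"]; on Pre_ the key exists, so getD's default is never used (KeyError is outside Pre_)
def pvRating (state : List (String × String)) : String :=
  (PySem.Dict.mk state).getD "rating" ""

def analyze_web_security_stats (web_state : List (String × List (String × String))) : List (String × Int) :=
  let res := web_state.foldl
    (fun (acc : Int × Int × Int) entry =>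
      let rating := pvRating entry.2
      if rating == "excellent" || rating == "good" then (acc.1 + 1, acc.2.1, acc.2.2)
      else if rating == "fair" then (acc.1, acc.2.1 + 1, acc.2.2)
      else (acc.1, acc.2.1, acc.2.2 + 1))
    (0, 0, 0)
  [("compliant", res.1), ("partially_compliant", res.2.1), ("non_compliant", res.2.2)]

-- ===== PORT B =====
-- the module-level _CATEGORY table of Source B
def pvCategoryTable : PySem.Dict String String :=
  PySem.Dict.mk [("excellent", "compliant"), ("good", "compliant"), ("fair", "partially_compliant")]

def analyze_web_security_stats_alt (web_state : List (String × List (String × String))) : List (String × Int) :=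
  let buckets := web_state.map (fun entry => pvCategoryTable.getD (pvRating entry.2) "non_compliant")
  ["compliant", "partially_compliant", "non_compliant"].map
    (fun key => (key, (PySem.List.count buckets key : Int)))

-- ===== PRECONDITION & SPEC =====
-- Pre_ excludes exactly the inputs on which A raises KeyError: an inner dict without a "rating" key.
def Pre_analyze_web_security_stats (web_state : List (String × List (String × String))) : Prop :=
  ∀ entry ∈ web_state, (PySem.Dict.mk entry.2).contains "rating" = true
instance (web_state : List (String × List (String × String))) : Decidable (Pre_analyze_web_security_stats web_state) := by unfold Pre_analyze_web_security_stats; infer_instance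

def pvWitness_analyze_web_security_stats : (List (String × List (String × String))) :=
  [("a.example", [("rating", "good")]), ("b.example", [("rating", "poor")])]

def Spec_analyze_web_security_stats (web_state : List (String × List (String × String))) (out : List (String × Int)) : Prop := out = analyze_web_security_stats_alt web_state
instance (web_state : List (String × List (String × String))) (out : List (String × Int)) : Decidable (Spec_analyze_web_security_stats web_state out) := by unfold Spec_analyze_web_security_stats; infer_instance

-- ===== CLAIM =====
def Claim_equal_analyze_web_security_stats : Prop := ∀ (web_state : List (String × List (String × String))), Dom_analyze_web_security_stats web_state → Pre_analyze_web_security_stats web_state → Spec_analyze_web_security_stats web_state (analyze_web_security_stats web_state)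

-- ===== LEMMAS AND PROOFS =====

def pvBucket (entry : String × List (String × String)) : String :=
  pvCategoryTable.getD (pvRating entry.2) "non_compliant"

lemma pvBucket_cases (e : String × List (String × String)) :
    (pvBucket e = "compliant" ∧ (pvRating e.2 = "excellent" ∨ pvRating e.2 = "good"))
    ∨ (pvBucket e = "partially_compliant" ∧ pvRating e.2 = "fair")
    ∨ (pvBucket e = "non_compliant" ∧ pvRating e.2 ≠ "excellent" ∧ pvRating e.2 ≠ "good" ∧ pvRating e.2 ≠ "fair") := by
  unfold pvBucket pvCategoryTable
  by_cases h1 : pvRating e.2 = "excellent"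
  · left; simp [h1, PySem.Dict.getD, PySem.Dict.get?]
  by_cases h2 : pvRating e.2 = "good"
  · left; simp [h2, PySem.Dict.getD, PySem.Dict.get?]
  by_cases h3 : pvRating e.2 = "fair"
  · right; left; simp [h3, PySem.Dict.getD, PySem.Dict.get?]
  · right; right
    refine ⟨?_, h1, h2, h3⟩
    simp [PySem.Dict.getD, PySem.Dict.get?, Ne.symm h1, Ne.symm h2, Ne.symm h3]

-- A's loop, characterised by bucket counts over the list.
lemma loopA_eq (l : List (String × List (String × String))) (c p n : Int) :
    l.foldl
      (fun (acc : Int × Int × Int) entry =>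
        let rating := pvRating entry.2
        if rating == "excellent" || rating == "good" then (acc.1 + 1, acc.2.1, acc.2.2)
        else if rating == "fair" then (acc.1, acc.2.1 + 1, acc.2.2)
        else (acc.1, acc.2.1, acc.2.2 + 1))
      (c, p, n) =
    (c + ((l.map pvBucket).count "compliant" : Nat),
     p + ((l.map pvBucket).count "partially_compliant" : Nat),
     n + ((l.map pvBucket).count "non_compliant" : Nat)) := by
  induction l generalizing c p n with
  | nil => simp
  | cons e t ih =>
    simp only [List.foldl_cons, List.map_cons]
    rcases pvBucket_cases e with ⟨hb, h | h⟩ | ⟨hb, h⟩ | ⟨hb, h1, h2, h3⟩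
    · rw [show (if pvRating e.2 == "excellent" || pvRating e.2 == "good" then ((c + 1 : Int), p, n)
          else if pvRating e.2 == "fair" then (c, p + 1, n) else (c, p, n + 1)) = (c + 1, p, n) by simp [h]]
      rw [ih]
      simp [hb]
      ring
    · rw [show (if pvRating e.2 == "excellent" || pvRating e.2 == "good" then ((c + 1 : Int), p, n)
          else if pvRating e.2 == "fair" then (c, p + 1, n) else (c, p, n + 1)) = (c + 1, p, n) by simp [h]]
      rw [ih]
      simp [hb]
      ring
    · rw [show (if pvRating e.2 == "excellent" || pvRating e.2 == "good" then ((c + 1 : Int), p, n)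
          else if pvRating e.2 == "fair" then (c, p + 1, n) else (c, p, n + 1)) = (c, p + 1, n) by simp [h]]
      rw [ih]
      simp [hb]
      ring
    · rw [show (if pvRating e.2 == "excellent" || pvRating e.2 == "good" then ((c + 1 : Int), p, n)
          else if pvRating e.2 == "fair" then (c, p + 1, n) else (c, p, n + 1)) = (c, p, n + 1) by simp [h1, h2, h3]]
      rw [ih]
      simp [hb]
      ring

-- ===== VERDICT =====
theorem analyze_web_security_stats_spec : Claim_equal_analyze_web_security_stats := by
  intro web_state _ _
  unfold Spec_analyze_web_security_stats analyze_web_security_stats analyze_web_security_stats_alt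
  simp only [loopA_eq, PySem.List.count, List.map_cons, List.map_nil]
  show _ = [("compliant", ((List.map pvBucket web_state).count "compliant" : Int)),
            ("partially_compliant", ((List.map pvBucket web_state).count "partially_compliant" : Int)),
            ("non_compliant", ((List.map pvBucket web_state).count "non_compliant" : Int))]
  simp
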